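-- pv_equiv track=rewrite | github.com/kfreezen/sheet-music-splitter | sheet_music_splitter/__init__.py | compute_rectangles
-- ===== SOURCE A (Python) =====
-- def compute_rectangles(line_sets):
--     rects = []
--     for line_set in line_sets:
--         min_x = None
--         min_y = None
--
--         max_x = None
--         max_y = None
--         for line in line_set:
--             if min_x is None:
--                 min_x = min(line[0], line[2])
--             else:
--                 min_x = min(min_x, line[0], line[2])
--
--             if min_y is None:
--                 min_y = min(line[1], line[3])
--             else:
--                 min_y = min(min_y, line[1], line[3])
--
--             if max_x is None:
--                 max_x = max(line[0], line[2])
--             else: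
--                 max_x = max(max_x, line[0], line[2])
--
--             if max_y is None:
--                 max_y = max(line[1], line[3])
--             else:
--                 max_y = max(max_y, line[1], line[3])
--
--         rects.append(((min_x, min_y), (max_x, max_y)))
--     return rects
-- ===== SOURCE B (Python) =====
-- def compute_rectangles(line_sets):
--     rects = []
--     for line_set in line_sets:
--         xs = sorted(x for line in line_set for x in (line[0], line[2]))
--         ys = sorted(y for line in line_set for y in (line[1], line[3]))
--         rects.append(((xs[0], ys[0]), (xs[-1], ys[-1])))
--     return rects
-- ===== Notes on version B (the rewrite author's own statement) =====
-- stated objective: alternative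
-- what changed: Replaces A's interleaved four-accumulator None-guarded running min/max loop with sorting each line set's x and y endpoint lists and reading the extremes off the sorted lists' ends (xs[0]/xs[-1]).
-- outside the precondition, e.g. on compute_rectangles([[]]): A returns [((None, None), (None, None))], B raises IndexError
import Mathlib
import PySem

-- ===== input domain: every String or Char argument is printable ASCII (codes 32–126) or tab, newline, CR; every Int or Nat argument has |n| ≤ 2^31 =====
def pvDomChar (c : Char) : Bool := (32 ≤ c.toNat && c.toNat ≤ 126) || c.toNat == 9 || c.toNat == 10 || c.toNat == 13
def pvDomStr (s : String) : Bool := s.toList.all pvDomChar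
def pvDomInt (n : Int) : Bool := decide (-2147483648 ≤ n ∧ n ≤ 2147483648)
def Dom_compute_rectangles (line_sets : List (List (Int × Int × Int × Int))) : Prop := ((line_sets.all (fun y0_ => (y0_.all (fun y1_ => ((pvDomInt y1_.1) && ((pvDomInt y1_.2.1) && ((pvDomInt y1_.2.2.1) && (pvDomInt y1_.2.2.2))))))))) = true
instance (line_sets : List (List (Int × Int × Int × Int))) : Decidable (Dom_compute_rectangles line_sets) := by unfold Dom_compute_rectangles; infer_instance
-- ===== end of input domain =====

-- B replaces A's interleaved four-accumulator None-guarded running min/max loop by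
-- sorting each line set's x and y endpoint lists and reading the extremes off the
-- sorted lists' ends (objective: alternative; not faster).
-- ===== PORT A =====
-- one iteration of A's inner loop: the four None-guarded min/max updates, in order
def pvStepA (st : Option Int × Option Int × Option Int × Option Int)
    (line : Int × Int × Int × Int) : Option Int × Option Int × Option Int × Option Int :=
  let min_x : Option Int := match st.1 with
    | none => some (min line.1 line.2.2.1)
    | some m => some (min (min m line.1) line.2.2.1)   -- min(m, l0, l2)
  let min_y : Option Int := match st.2.1 with
    | none => some (min line.2.1 line.2.2.2)
    | some m => some (min (min m line.2.1) line.2.2.2)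
  let max_x : Option Int := match st.2.2.1 with
    | none => some (max line.1 line.2.2.1)
    | some m => some (max (max m line.1) line.2.2.1)
  let max_y : Option Int := match st.2.2.2 with
    | none => some (max line.2.1 line.2.2.2)
    | some m => some (max (max m line.2.1) line.2.2.2)
  (min_x, min_y, max_x, max_y)

def compute_rectangles (line_sets : List (List (Int × Int × Int × Int))) : List ((Int × Int) × (Int × Int)) :=
  line_sets.foldl (fun rects line_set =>
    let st := line_set.foldl pvStepA (none, none, none, none)
    -- under Pre_ every line_set is nonempty, so all four options are `some`;
    -- `.getD 0` extracts the value (A returns None tuples on an empty set — excluded by Pre_)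
    rects ++ [((st.1.getD 0, st.2.1.getD 0), (st.2.2.1.getD 0, st.2.2.2.getD 0))]) []

-- ===== PORT B =====
-- xs = sorted x endpoints, ys = sorted y endpoints; rect = ((xs[0], ys[0]), (xs[-1], ys[-1]))
-- (xs[0]/xs[-1] via pyGet?; `.getD 0` is unreachable under Pre_, where both lists are nonempty)
def pvRectB (s : List (Int × Int × Int × Int)) : (Int × Int) × (Int × Int) :=
  let xs := PySem.List.sorted (s.flatMap (fun l => [l.1, l.2.2.1])) (fun x => x) false
  let ys := PySem.List.sorted (s.flatMap (fun l => [l.2.1, l.2.2.2])) (fun x => x) false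
  (((PySem.List.pyGet? xs 0).getD 0, (PySem.List.pyGet? ys 0).getD 0),
   ((PySem.List.pyGet? xs (-1)).getD 0, (PySem.List.pyGet? ys (-1)).getD 0))

def compute_rectangles_alt (line_sets : List (List (Int × Int × Int × Int))) : List ((Int × Int) × (Int × Int)) :=
  line_sets.foldl (fun rects line_set => rects ++ [pvRectB line_set]) []

-- ===== PRECONDITION & SPEC =====
-- Pre_ excludes line_sets containing an empty line set: there A returns ((None,None),(None,None)),
-- which is not a value of the declared Int-pair type (and B's xs[0] raises IndexError).
def Pre_compute_rectangles (line_sets : List (List (Int × Int × Int × Int))) : Prop :=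
  ∀ s ∈ line_sets, s ≠ []
instance (line_sets : List (List (Int × Int × Int × Int))) : Decidable (Pre_compute_rectangles line_sets) := by
  unfold Pre_compute_rectangles; infer_instance

def pvWitness_compute_rectangles : (List (List (Int × Int × Int × Int))) :=
  [[(0, 1, 2, 3)], [(5, 5, 1, 2), (3, 0, 3, 9)]]

def Spec_compute_rectangles (line_sets : List (List (Int × Int × Int × Int))) (out : List ((Int × Int) × (Int × Int))) : Prop := out = compute_rectangles_alt line_sets
instance (line_sets : List (List (Int × Int × Int × Int))) (out : List ((Int × Int) × (Int × Int))) : Decidable (Spec_compute_rectangles line_sets out) := by unfold Spec_compute_rectangles; infer_instance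

-- ===== CLAIM (what is proved, stated in full; the proofs are below) =====
def Claim_equal_compute_rectangles : Prop := ∀ (line_sets : List (List (Int × Int × Int × Int))), Dom_compute_rectangles line_sets → Pre_compute_rectangles line_sets → Spec_compute_rectangles line_sets (compute_rectangles line_sets)

-- ===== LEMMAS AND PROOFS =====

-- foldl min/max produce an element of the list and a bound for the whole list
theorem pvFmin_le_init (xr : List Int) : ∀ x0 : Int, xr.foldl min x0 ≤ x0 := by
  induction xr with
  | nil => intro x0; simp
  | cons a t ih => intro x0; exact le_trans (ih (min x0 a)) (min_le_left _ _)

theorem pvFmin_mem (xr : List Int) : ∀ x0 : Int, xr.foldl min x0 ∈ x0 :: xr := by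
  induction xr with
  | nil => intro x0; simp
  | cons a t ih =>
    intro x0
    rw [List.foldl_cons]
    rcases List.mem_cons.mp (ih (min x0 a)) with h | h
    · rcases min_choice x0 a with h' | h' <;> rw [h, h'] <;> simp
    · simp [h]

theorem pvFmin_le (xr : List Int) : ∀ x0 : Int, ∀ y ∈ x0 :: xr, xr.foldl min x0 ≤ y := by
  induction xr with
  | nil => intro x0 y hy; simp_all
  | cons a t ih =>
    intro x0 y hy
    rw [List.foldl_cons]
    rcases List.mem_cons.mp hy with h | hy
    · subst h; exact le_trans (pvFmin_le_init t (min y a)) (min_le_left _ _)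
    · rcases List.mem_cons.mp hy with h | hy
      · subst h; exact le_trans (pvFmin_le_init t (min x0 y)) (min_le_right _ _)
      · exact ih (min x0 a) y (List.mem_cons_of_mem _ hy)

theorem pvFmax_ge_init (xr : List Int) : ∀ x0 : Int, x0 ≤ xr.foldl max x0 := by
  induction xr with
  | nil => intro x0; simp
  | cons a t ih => intro x0; exact le_trans (le_max_left _ _) (ih (max x0 a))

theorem pvFmax_mem (xr : List Int) : ∀ x0 : Int, xr.foldl max x0 ∈ x0 :: xr := by
  induction xr with
  | nil => intro x0; simp
  | cons a t ih =>
    intro x0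
    rw [List.foldl_cons]
    rcases List.mem_cons.mp (ih (max x0 a)) with h | h
    · rcases max_choice x0 a with h' | h' <;> rw [h, h'] <;> simp
    · simp [h]

theorem pvFmax_ge (xr : List Int) : ∀ x0 : Int, ∀ y ∈ x0 :: xr, y ≤ xr.foldl max x0 := by
  induction xr with
  | nil => intro x0 y hy; simp_all
  | cons a t ih =>
    intro x0 y hy
    rw [List.foldl_cons]
    rcases List.mem_cons.mp hy with h | hy
    · subst h; exact le_trans (le_max_left _ _) (pvFmax_ge_init t (max y a))
    · rcases List.mem_cons.mp hy with h | hy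
      · subst h; exact le_trans (le_max_right _ _) (pvFmax_ge_init t (max x0 y))
      · exact ih (max x0 a) y (List.mem_cons_of_mem _ hy)

-- head of the ascending sort of a nonempty list is its minimum (= foldl min)
theorem pvSorted_head (x0 : Int) (xr : List Int) :
    PySem.List.pyGet? (PySem.List.sorted (x0 :: xr) (fun x => x) false) 0 = some (xr.foldl min x0) := by
  rcases hsz : PySem.List.sorted (x0 :: xr) (fun x => x) false with _ | ⟨m, t⟩
  · exact absurd ((PySem.List.sorted_eq_nil_iff ..).mp hsz) (by simp)
  · have hm : m ∈ x0 :: xr := (PySem.List.mem_sorted ..).mp (hsz ▸ List.mem_cons_self ..)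
    have hle := PySem.List.key_head_sorted_le _ _ hsz
    have h1 : m ≤ xr.foldl min x0 := hle _ (pvFmin_mem xr x0)
    have h2 : xr.foldl min x0 ≤ m := pvFmin_le xr x0 m hm
    simp [le_antisymm h1 h2]

-- every element of a ≤-pairwise list is at most its last element
theorem pvPw_le_getLast? (ys : List Int) (hp : ys.Pairwise (fun a b => a ≤ b)) :
    ∀ y ∈ ys, ∀ m, ys.getLast? = some m → y ≤ m := by
  induction ys with
  | nil => intro y hy; simp at hy
  | cons a t ih =>
    intro y hy m hm
    rcases List.pairwise_cons.mp hp with ⟨ha, hpt⟩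
    cases t with
    | nil => simp_all
    | cons b t' =>
      have hm' : (b :: t').getLast? = some m := by
        rw [List.getLast?_cons_cons] at hm; exact hm
      rcases List.mem_cons.mp hy with rfl | hy
      · exact ha m (List.mem_of_getLast? hm')
      · exact ih hpt y hy m hm'

-- last of the ascending sort of a nonempty list is its maximum (= foldl max)
theorem pvSorted_last (x0 : Int) (xr : List Int) :
    PySem.List.pyGet? (PySem.List.sorted (x0 :: xr) (fun x => x) false) (-1) = some (xr.foldl max x0) := by
  rw [PySem.List.pyGet?_neg_one]
  rcases hl : (PySem.List.sorted (x0 :: xr) (fun x => x) false).getLast? with _ | m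
  · rw [List.getLast?_eq_none_iff] at hl
    exact absurd ((PySem.List.sorted_eq_nil_iff ..).mp hl) (by simp)
  · have hmem : m ∈ x0 :: xr := (PySem.List.mem_sorted ..).mp (List.mem_of_getLast? hl)
    have hp := PySem.List.sorted_pairwise (xs := x0 :: xr) (key := fun x => x)
    have h1 : ∀ y ∈ x0 :: xr, y ≤ m := fun y hy =>
      pvPw_le_getLast? _ hp y ((PySem.List.mem_sorted ..).mpr hy) m hl
    have h2 : xr.foldl max x0 ≤ m := h1 _ (pvFmax_mem xr x0)
    have h3 : m ≤ xr.foldl max x0 := pvFmax_ge xr x0 m hmem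
    rw [le_antisymm h3 h2]

-- once every accumulator is `some`, A's inner loop computes exactly the running
-- min/max of the flattened endpoint lists
theorem pvStepA_fold_some (t : List (Int × Int × Int × Int)) (a b c d : Int) :
    t.foldl pvStepA (some a, some b, some c, some d) =
      (some ((t.flatMap (fun l => [l.1, l.2.2.1])).foldl min a),
       some ((t.flatMap (fun l => [l.2.1, l.2.2.2])).foldl min b),
       some ((t.flatMap (fun l => [l.1, l.2.2.1])).foldl max c),
       some ((t.flatMap (fun l => [l.2.1, l.2.2.2])).foldl max d)) := by
  induction t generalizing a b c d with
  | nil => simp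
  | cons l t ih => simp [pvStepA, ih]

-- per nonempty line set, A's accumulated state is exactly B's sorted-endpoint rectangle
theorem pvRect_eq (s : List (Int × Int × Int × Int)) (hs : s ≠ []) :
    (s.foldl pvStepA (none, none, none, none)) =
      (some (pvRectB s).1.1, some (pvRectB s).1.2, some (pvRectB s).2.1, some (pvRectB s).2.2) := by
  cases s with
  | nil => exact absurd rfl hs
  | cons l t =>
    simp only [List.foldl_cons, pvStepA]
    rw [pvStepA_fold_some]
    have hx := pvSorted_head l.1 (l.2.2.1 :: t.flatMap (fun l => [l.1, l.2.2.1]))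
    have hy := pvSorted_head l.2.1 (l.2.2.2 :: t.flatMap (fun l => [l.2.1, l.2.2.2]))
    have hx' := pvSorted_last l.1 (l.2.2.1 :: t.flatMap (fun l => [l.1, l.2.2.1]))
    have hy' := pvSorted_last l.2.1 (l.2.2.2 :: t.flatMap (fun l => [l.2.1, l.2.2.2]))
    simp only [List.foldl_cons] at hx hy hx' hy'
    simp [pvRectB, List.flatMap_cons, hx, hy, hx', hy']

-- ===== VERDICT (by name: the statement is the Claim_ definition above) =====
theorem compute_rectangles_spec : Claim_equal_compute_rectangles := by
  intro line_sets hdom hpre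
  clear hdom
  unfold Spec_compute_rectangles compute_rectangles compute_rectangles_alt
  induction line_sets with
  | nil => rfl
  | cons s rest ih =>
    have hs : s ≠ [] := hpre s (List.mem_cons_self ..)
    have hrest : Pre_compute_rectangles rest := fun x hx => hpre x (List.mem_cons_of_mem _ hx)
    rw [PySem.List.foldl_append_singleton_eq_map, PySem.List.foldl_append_singleton_eq_map] at ih ⊢
    have ih' := ih hrest
    simp only [List.nil_append] at ih'
    simp [pvRect_eq s hs, ih']
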